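-- pv_equiv track=rewrite | github.com/josergdev/SkyscrapersNxN-Backtracking | skyscrapersNxN.py | get_clue_of_completed_row
-- ===== SOURCE A (Python) =====
-- def get_clue_of_completed_row(row):
-- 	v = 0
-- 	m = 0
-- 	for x in row:
-- 		if m < x:
-- 			v += 1
-- 		m = max(m, x)
-- 	return v
-- ===== SOURCE B (Python) =====
-- def get_clue_of_completed_row(row):
-- 	return sum(1 for i, x in enumerate(row) if x > 0 and all(row[j] < x for j in range(i)))
-- ===== Notes on version B (the rewrite author's own statement) =====
-- stated objective: alternative
-- what changed: A's single pass with running-maximum state is replaced by a stateless per-element visibility test: an element is counted iff it is positive and strictly greater than every earlier element (checked by an inner scan over the preceding indices), so no accumulator is carried between iterations.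
import Mathlib
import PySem

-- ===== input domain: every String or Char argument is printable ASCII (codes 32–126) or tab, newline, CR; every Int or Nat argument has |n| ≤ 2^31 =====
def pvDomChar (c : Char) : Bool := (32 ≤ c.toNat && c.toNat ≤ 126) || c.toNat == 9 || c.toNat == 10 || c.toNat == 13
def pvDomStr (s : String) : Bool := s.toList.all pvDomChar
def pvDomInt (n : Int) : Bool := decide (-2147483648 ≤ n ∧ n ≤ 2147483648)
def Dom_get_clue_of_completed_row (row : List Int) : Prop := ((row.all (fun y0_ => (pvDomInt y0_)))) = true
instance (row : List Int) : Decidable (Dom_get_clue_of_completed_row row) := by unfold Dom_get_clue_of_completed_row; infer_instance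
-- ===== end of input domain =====

-- B drops A's running-maximum accumulator: it counts each element that is positive and strictly
-- greater than every earlier element, rescanning the prefix per element (objective: alternative).

-- ===== PORT A =====
-- fold over the same (v, m) state as A's loop
def get_clue_of_completed_row (row : List Int) : Int :=
  (row.foldl (fun (s : Int × Int) x =>
    (if s.2 < x then s.1 + 1 else s.1, max s.2 x)) (0, 0)).1

-- ===== PORT B =====
-- sum(1 for i, x in enumerate(row) if x > 0 and all(row[j] < x for j in range(i)))
def get_clue_of_completed_row_alt (row : List Int) : Int :=
  ((PySem.List.enumerate row 0).map
    (fun p => if 0 < p.2 && (PySem.List.pyRange 0 p.1 1).all (fun j => PySem.List.pyGetD row j 0 < p.2)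
              then (1 : Int) else 0)).sum

-- ===== PRECONDITION & SPEC =====
def Spec_get_clue_of_completed_row (row : List Int) (out : Int) : Prop := out = get_clue_of_completed_row_alt row
instance (row : List Int) (out : Int) : Decidable (Spec_get_clue_of_completed_row row out) := by unfold Spec_get_clue_of_completed_row; infer_instance

-- ===== CLAIM (what is proved, stated in full; the proofs are below) =====
def Claim_equal_get_clue_of_completed_row : Prop := ∀ (row : List Int), Dom_get_clue_of_completed_row row → Spec_get_clue_of_completed_row row (get_clue_of_completed_row row)

-- ===== LEMMAS AND PROOFS =====

-- shared characterisation: count of strict increases of the running max, starting from m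
def pvCnt (m : Int) : List Int → Int
  | [] => 0
  | x :: rest => (if m < x then 1 else 0) + pvCnt (max m x) rest

lemma foldA_eq_pvCnt (row : List Int) : ∀ (v m : Int),
    (row.foldl (fun (s : Int × Int) x =>
      (if s.2 < x then s.1 + 1 else s.1, max s.2 x)) (v, m)).1 = v + pvCnt m row := by
  induction row with
  | nil => intro v m; simp [pvCnt]
  | cons x rest ih =>
    intro v m
    rw [List.foldl_cons, ih, pvCnt]
    split_ifs <;> ring

lemma foldl_max_lt (pre : List Int) : ∀ (a x : Int),
    pre.foldl max a < x ↔ a < x ∧ ∀ y ∈ pre, y < x := by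
  induction pre with
  | nil => simp
  | cons z t ih =>
    intro a x
    rw [List.foldl_cons, ih]
    constructor
    · rintro ⟨h1, h2⟩
      exact ⟨lt_of_le_of_lt (le_max_left a z) h1,
        fun y hy => by rcases List.mem_cons.mp hy with h | h
                       · exact h ▸ lt_of_le_of_lt (le_max_right a z) h1
                       · exact h2 y h⟩
    · rintro ⟨h1, h2⟩
      exact ⟨max_lt h1 (h2 z (List.mem_cons_self ..)),
        fun y hy => h2 y (List.mem_cons_of_mem _ hy)⟩

lemma bgen (rest : List Int) : ∀ (pre : List Int),
    ((PySem.List.enumerate rest (pre.length : Int)).map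
      (fun p => if 0 < p.2 && (PySem.List.pyRange 0 p.1 1).all
                  (fun j => PySem.List.pyGetD (pre ++ rest) j 0 < p.2)
                then (1 : Int) else 0)).sum
    = pvCnt (pre.foldl max 0) rest := by
  induction rest with
  | nil => intro pre; simp [PySem.List.enumerate_nil, pvCnt]
  | cons x t ih =>
    intro pre
    rw [PySem.List.enumerate_cons, List.map_cons, List.sum_cons, pvCnt]
    have hmap : (PySem.List.pyRange 0 (pre.length : Int) 1).map
        (fun j => PySem.List.pyGetD (pre ++ x :: t) j 0) = pre := by
      apply List.ext_getElem
      · simp [PySem.List.length_pyRange_one]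
      · intro k hk hk'
        rw [List.getElem_map, PySem.List.getElem_pyRange_one]
        have hkpre : k < pre.length := hk'
        have h0k : (0 : Int) + k = ((k : Nat) : Int) := by push_cast; ring
        rw [h0k, PySem.List.pyGetD_natCast]
        rw [List.getD_eq_getElem _ _ (by simp; omega), List.getElem_append_left hkpre]
    have hall : ((PySem.List.pyRange 0 (pre.length : Int) 1).all
          (fun j => decide (PySem.List.pyGetD (pre ++ x :: t) j 0 < x)))
        = pre.all (fun y => decide (y < x)) := by
      have := List.all_map (l := PySem.List.pyRange 0 (pre.length : Int) 1)
        (f := fun j => PySem.List.pyGetD (pre ++ x :: t) j 0)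
        (p := fun y => decide (y < x))
      rw [hmap] at this
      exact this.symm
    have hterm : (if 0 < x && (PySem.List.pyRange 0 (pre.length : Int) 1).all
                      (fun j => PySem.List.pyGetD (pre ++ x :: t) j 0 < x)
                  then (1 : Int) else 0) = (if pre.foldl max 0 < x then (1 : Int) else 0) := by
      simp only [hall]
      by_cases h : pre.foldl max 0 < x
      · obtain ⟨h0, hall2⟩ := (foldl_max_lt pre 0 x).mp h
        simp only [h0, decide_true, Bool.true_and, List.all_eq_true, decide_eq_true_eq]
        rw [if_pos hall2, if_pos h]
      · rw [if_neg h]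
        rw [foldl_max_lt] at h
        push Not at h
        by_cases h0 : 0 < x
        · obtain ⟨y, hy, hyx⟩ := h h0
          have : ¬ (pre.all (fun y => decide (y < x)) = true) := by
            simp [List.all_eq_true]; exact ⟨y, hy, hyx⟩
          simp [this]
        · simp [h0]
    have htail :
        ((PySem.List.enumerate t ((pre.length : Int) + 1)).map
          (fun p => if 0 < p.2 && (PySem.List.pyRange 0 p.1 1).all
                      (fun j => PySem.List.pyGetD (pre ++ x :: t) j 0 < p.2)
                    then (1 : Int) else 0)).sum
        = pvCnt (max (pre.foldl max 0) x) t := by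
      have h1 : ((pre.length : Int) + 1) = (((pre ++ [x]).length : Nat) : Int) := by simp
      have h2 : pre ++ x :: t = (pre ++ [x]) ++ t := by simp
      rw [h2, h1, ih (pre ++ [x])]
      simp [List.foldl_append]
    rw [hterm, htail]

theorem pv_main (row : List Int) :
    get_clue_of_completed_row row = get_clue_of_completed_row_alt row := by
  unfold get_clue_of_completed_row get_clue_of_completed_row_alt
  rw [foldA_eq_pvCnt]
  have := bgen row []
  simp only [List.length_nil, Int.natCast_zero, List.nil_append, List.foldl_nil] at this
  rw [zero_add]
  exact this.symm

-- ===== VERDICT (by name: the statement is the Claim_ definition above) =====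
theorem get_clue_of_completed_row_spec : Claim_equal_get_clue_of_completed_row := by
  intro row _
  exact pv_main row
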